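-- pv_equiv track=rewrite | github.com/georgianamaxim/flcd | lab2/cr.py | generators_without_gcd
-- ===== SOURCE A (Python) =====
-- def generators_without_gcd(n):
--     group_set = {i for i in range(0,n)}
--     generators_list = []
--     generators_list.append(1)
--     for possible_generator in range(2,n):
--         solutions = set()
--         start = 0
--         current = -1
--         while current != start:
--             if current == -1:
--                 current = (start + possible_generator)%n
--             else:
--                 current = (current + possible_generator)%n
--             solutions.add(current)
--         if solutions == group_set:
--             generators_list.append(possible_generator)
--     return generators_list
-- ===== SOURCE B (Python) =====
-- def generators_without_gcd(n):
--     def gcd(a, b):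
--         while b:
--             a, b = b, a % b
--         return a
--     return [1] + [g for g in range(2, n) if gcd(g, n) == 1]
-- ===== Notes on version B (the rewrite author's own statement) =====
-- stated objective: faster
-- what changed: Replaces A's per-candidate orbit simulation (building the cyclic subgroup of each candidate and comparing it with the whole group) by a Euclidean-gcd coprimality test per candidate.
import Mathlib
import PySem

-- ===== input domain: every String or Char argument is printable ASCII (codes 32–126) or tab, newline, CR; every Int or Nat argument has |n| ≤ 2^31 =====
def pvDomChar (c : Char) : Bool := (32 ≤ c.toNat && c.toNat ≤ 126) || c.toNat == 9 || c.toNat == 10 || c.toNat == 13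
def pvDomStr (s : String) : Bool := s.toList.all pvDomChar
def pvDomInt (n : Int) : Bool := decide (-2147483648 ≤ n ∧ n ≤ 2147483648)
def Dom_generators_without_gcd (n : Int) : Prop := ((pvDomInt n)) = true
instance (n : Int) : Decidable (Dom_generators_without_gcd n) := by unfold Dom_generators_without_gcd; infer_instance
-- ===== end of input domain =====

-- B replaces A's per-candidate orbit simulation with a Euclidean-gcd coprimality test (faster in a timing run).

-- ===== PORT A =====
-- A's while-loop: state (current, solutions); start is always 0, so the condition 'current != start'
-- is 'current ≠ 0'.  Fuel bounds the iteration count; n.toNat + 1 steps always suffice (the orbit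
-- closes after at most n additions), which the equivalence proof below verifies.
def pvALoop (n g : Int) : Nat → Int → PySem.Set Int → PySem.Set Int
  | 0, _, sols => sols
  | fuel+1, current, sols =>
    if current = 0 then sols
    else
      let c := if current = -1 then PySem.Int.mod (0 + g) n else PySem.Int.mod (current + g) n
      pvALoop n g fuel c (PySem.Set.add sols c)

def generators_without_gcd (n : Int) : List Int :=
  let group_set : PySem.Set Int := PySem.Set.ofList (PySem.List.pyRange 0 n 1)
  (PySem.List.pyRange 2 n 1).foldl
    (fun acc possible_generator =>
      let solutions := pvALoop n possible_generator (n.toNat + 1) (-1) PySem.Set.empty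
      if PySem.Set.equal solutions group_set then acc ++ [possible_generator] else acc)
    [1]

-- ===== PORT B =====
-- Source B's hand-written Euclidean loop 'while b: a, b = b, a % b'; fuel bounds the iteration count
-- (the second argument is nonnegative and strictly decreasing here, so n.toNat + 2 suffices).
def pvBGcd : Nat → Int → Int → Int
  | 0, a, _ => a
  | fuel+1, a, b => if b = 0 then a else pvBGcd fuel b (PySem.Int.mod a b)

def generators_without_gcd_alt (n : Int) : List Int :=
  1 :: (PySem.List.pyRange 2 n 1).filter (fun g => pvBGcd (n.toNat + 2) g n == 1)

-- ===== PRECONDITION & SPEC =====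
def Spec_generators_without_gcd (n : Int) (out : List Int) : Prop := out = generators_without_gcd_alt n
instance (n : Int) (out : List Int) : Decidable (Spec_generators_without_gcd n out) := by unfold Spec_generators_without_gcd; infer_instance

-- ===== CLAIM (what is proved, stated in full; the proofs are below) =====
def Claim_equal_generators_without_gcd : Prop := ∀ (n : Int), Dom_generators_without_gcd n → Spec_generators_without_gcd n (generators_without_gcd n)

-- ===== LEMMAS AND PROOFS =====

-- B's Euclid computes Int.gcd on nonnegative inputs, given enough fuel.
theorem pvBGcd_eq : ∀ (fuel : Nat) (a b : Int), 0 ≤ a → 0 ≤ b → b < (fuel : Int) →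
    pvBGcd fuel a b = (Int.gcd a b : Int) := by
  intro fuel
  induction fuel with
  | zero => intro a b _ hb hlt; exact absurd (lt_of_le_of_lt hb hlt) (by norm_num)
  | succ f ih =>
    intro a b ha hb hlt
    by_cases h : b = 0
    · subst h
      simp [pvBGcd, Int.gcd, Int.natAbs_of_nonneg ha]
    · have hbpos : 0 < b := lt_of_le_of_ne hb (Ne.symm h)
      have hmod : PySem.Int.mod a b = a % b := PySem.Int.mod_eq_emod_of_pos hbpos
      have h1 : 0 ≤ a % b := Int.emod_nonneg a h
      have h2 : a % b < b := Int.emod_lt_of_pos a hbpos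
      have h3 : a % b < (f : Int) := by push_cast at hlt ⊢; omega
      rw [pvBGcd, if_neg h, hmod, ih b (a % b) hb h1 h3, Int.gcd_comm b (a % b), Int.gcd_emod]

-- elements already collected survive the rest of A's loop
theorem pvALoop_mono (n g : Int) : ∀ (fuel : Nat) (c : Int) (sols : PySem.Set Int) (x : Int),
    x ∈ sols → x ∈ pvALoop n g fuel c sols := by
  intro fuel
  induction fuel with
  | zero => intro c sols x hx; exact hx
  | succ f ih =>
    intro c sols x hx
    rw [pvALoop]
    by_cases h : c = 0
    · rw [if_pos h]; exact hx
    · rw [if_neg h]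
      exact ih _ _ x ((PySem.Set.mem_add _ _ _).mpr (Or.inl hx))

-- every element A's loop ever collects is divisible by any common divisor of g and n
theorem pvALoop_dvd (n g d : Int) (hdg : d ∣ g) (hdn : d ∣ n) :
    ∀ (fuel : Nat) (c : Int) (sols : PySem.Set Int), (c = -1 ∨ d ∣ c) → (∀ x ∈ sols, d ∣ x) →
    ∀ x ∈ pvALoop n g fuel c sols, d ∣ x := by
  intro fuel
  induction fuel with
  | zero => intro c sols _ hs x hx; exact hs x hx
  | succ f ih =>
    intro c sols hc hs x hx
    rw [pvALoop] at hx
    by_cases h : c = 0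
    · rw [if_pos h] at hx; exact hs x hx
    · rw [if_neg h] at hx
      simp only [] at hx
      set y : Int := if c = -1 then 0 + g else c + g with hy
      have hdy : d ∣ y := by
        rw [hy]
        by_cases hc1 : c = -1
        · rw [if_pos hc1, zero_add]; exact hdg
        · rw [if_neg hc1]
          rcases hc with hc | hc
          · exact absurd hc hc1
          · exact dvd_add hc hdg
      have hmodeq : PySem.Int.floordiv y n * n + PySem.Int.mod y n = y :=
        PySem.Int.floordiv_mul_add_mod y n
      have hdc' : d ∣ PySem.Int.mod y n := by
        have : PySem.Int.mod y n = y - PySem.Int.floordiv y n * n := by omega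
        rw [this]
        exact dvd_sub hdy (Dvd.dvd.mul_left hdn _)
      have hceq : (if c = -1 then PySem.Int.mod (0 + g) n else PySem.Int.mod (c + g) n)
          = PySem.Int.mod y n := by
        rw [hy]; by_cases hc1 : c = -1 <;> simp [hc1]
      rw [hceq] at hx
      refine ih _ _ (Or.inr hdc') ?_ x hx
      intro z hz
      rcases (PySem.Set.mem_add _ _ _).mp hz with hz | hz
      · exact hs z hz
      · rw [hz]; exact hdc'

-- every element A's loop ever collects lies in [0, n)
theorem pvALoop_range (n g : Int) (hn : 0 < n) :
    ∀ (fuel : Nat) (c : Int) (sols : PySem.Set Int), (∀ x ∈ sols, 0 ≤ x ∧ x < n) →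
    ∀ x ∈ pvALoop n g fuel c sols, 0 ≤ x ∧ x < n := by
  intro fuel
  induction fuel with
  | zero => intro c sols hs x hx; exact hs x hx
  | succ f ih =>
    intro c sols hs x hx
    rw [pvALoop] at hx
    by_cases h : c = 0
    · rw [if_pos h] at hx; exact hs x hx
    · rw [if_neg h] at hx
      simp only [] at hx
      have hb : ∀ y : Int, 0 ≤ PySem.Int.mod y n ∧ PySem.Int.mod y n < n := fun y =>
        ⟨PySem.Int.mod_nonneg y hn, PySem.Int.mod_lt y hn⟩
      refine ih _ _ ?_ x hx
      intro z hz
      rcases (PySem.Set.mem_add _ _ _).mp hz with hz | hz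
      · exact hs z hz
      · rw [hz]
        by_cases hc1 : c = -1
        · rw [if_pos hc1]; exact hb _
        · rw [if_neg hc1]; exact hb _

-- stepping from (j·g) mod n adds ((j+1)·g) mod n
theorem pvStep_eq (n g : Int) (_hn : 0 < n) (j : Int) :
    PySem.Int.mod (PySem.Int.mod (j * g) n + g) n = PySem.Int.mod ((j + 1) * g) n := by
  rw [PySem.Int.mod_eq_emod_of_pos _hn, PySem.Int.mod_eq_emod_of_pos _hn,
      PySem.Int.mod_eq_emod_of_pos _hn, Int.emod_add_emod]
  ring_nf

-- for a coprime candidate the loop does not stop before the n-th multiple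
theorem pvNonzero (n g : Int) (_hn : 0 < n) (hcop : Int.gcd g n = 1) (j : Int)
    (h1 : 1 ≤ j) (h2 : j < n) : PySem.Int.mod (j * g) n ≠ 0 := by
  intro h
  have hdvd : n ∣ j * g := (PySem.Int.mod_eq_zero_iff_dvd _ _).mp h
  have hco : IsCoprime n g := (Int.isCoprime_iff_gcd_eq_one.mpr hcop).symm
  have : n ∣ j := hco.dvd_of_dvd_mul_right hdvd
  have := Int.le_of_dvd (by omega) this
  omega

-- with coprime g, from state (j·g) mod n the loop still collects every later multiple up to n·g
theorem pvALoop_reach (n g : Int) (hn : 0 < n) (hcop : Int.gcd g n = 1) :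
    ∀ (fuel : Nat) (j : Int) (sols : PySem.Set Int), 1 ≤ j → n - j < (fuel : Int) →
    ∀ k : Int, j < k → k ≤ n →
    PySem.Int.mod (k * g) n ∈ pvALoop n g fuel (PySem.Int.mod (j * g) n) sols := by
  intro fuel
  induction fuel with
  | zero =>
    intro j sols h1 hf k hk1 hk2
    exact absurd hf (by push_cast; omega)
  | succ f ih =>
    intro j sols h1 hf k hk1 hk2
    have hjn : j < n := lt_of_lt_of_le hk1 hk2
    have hne : PySem.Int.mod (j * g) n ≠ 0 := pvNonzero n g hn hcop j h1 hjn
    rw [pvALoop, if_neg hne]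
    have hnn : PySem.Int.mod (j * g) n ≠ -1 := by
      have := PySem.Int.mod_nonneg (j * g) hn; omega
    simp only [if_neg hnn]
    rw [pvStep_eq n g hn j]
    by_cases hk : k = j + 1
    · subst hk
      exact pvALoop_mono n g f _ _ _ ((PySem.Set.mem_add _ _ _).mpr (Or.inr rfl))
    · exact ih (j + 1) _ (by omega) (by push_cast at hf ⊢; omega) k (by omega) hk2

-- Bézout: with coprime g every residue in [0, n) is (k·g) mod n for some k in [1, n]
theorem pvCover (n g : Int) (hn : 0 < n) (hcop : Int.gcd g n = 1) (x : Int)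
    (hx0 : 0 ≤ x) (hxn : x < n) :
    ∃ k : Int, 1 ≤ k ∧ k ≤ n ∧ PySem.Int.mod (k * g) n = x := by
  have hbez : (1 : Int) = g * Int.gcdA g n + n * Int.gcdB g n := by
    have := Int.gcd_eq_gcd_ab g n
    rw [hcop] at this
    exact_mod_cast this
  set u := Int.gcdA g n with hu
  set v := Int.gcdB g n with hv
  set k0 := (x * u) % n with hk0
  have hk00 : 0 ≤ k0 := Int.emod_nonneg _ (by omega)
  have hk0n : k0 < n := Int.emod_lt_of_pos _ hn
  have hkey : (k0 * g) % n = x % n := by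
    have h1 : (k0 * g) % n = (x * u * g) % n := by
      rw [hk0, Int.mul_emod, Int.emod_emod_of_dvd _ (dvd_refl n), ← Int.mul_emod]
    have h2 : x * u * g = x - x * v * n := by
      have : x * (g * u + n * v) = x * 1 := by rw [← hbez]
      ring_nf at this ⊢
      linarith
    rw [h1, h2, Int.sub_mul_emod_self_right]
  by_cases hz : k0 = 0
  · refine ⟨n, by omega, le_refl n, ?_⟩
    have hx : x % n = 0 := by
      rw [← hkey, hz, zero_mul]; simp
    have hx0' : x = 0 := by rw [Int.emod_eq_of_lt hx0 hxn] at hx; exact hx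
    rw [PySem.Int.mod_eq_emod_of_pos hn, hx0']
    simp
  · refine ⟨k0, by omega, by omega, ?_⟩
    rw [PySem.Int.mod_eq_emod_of_pos hn, hkey, Int.emod_eq_of_lt hx0 hxn]

-- A's per-candidate test equals the coprimality test, for 2 ≤ g < n
theorem pvACond (n g : Int) (hg2 : 2 ≤ g) (hgn : g < n) :
    PySem.Set.equal (pvALoop n g (n.toNat + 1) (-1) PySem.Set.empty)
      (PySem.Set.ofList (PySem.List.pyRange 0 n 1)) = decide (Int.gcd g n = 1) := by
  have hn : 0 < n := by omega
  have hfirst : pvALoop n g (n.toNat + 1) (-1) PySem.Set.empty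
      = pvALoop n g n.toNat (PySem.Int.mod (1 * g) n)
          (PySem.Set.add PySem.Set.empty (PySem.Int.mod (1 * g) n)) := by
    rw [pvALoop]
    norm_num
  have hmemgrp : ∀ x : Int, x ∈ PySem.Set.ofList (PySem.List.pyRange 0 n 1) ↔ 0 ≤ x ∧ x < n := by
    intro x
    rw [PySem.Set.mem_ofList, PySem.List.mem_pyRange_one]
  by_cases hcop : Int.gcd g n = 1
  · rw [hcop]
    simp only [decide_true]
    rw [(PySem.Set.equal_iff _ _)]
    intro x
    rw [hmemgrp x]
    constructor
    · intro hx
      refine pvALoop_range n g hn _ _ _ ?_ x (hfirst ▸ hx)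
      intro z hz
      rcases (PySem.Set.mem_add _ _ _).mp hz with hz | hz
      · cases hz
      · rw [hz]
        exact ⟨PySem.Int.mod_nonneg _ hn, PySem.Int.mod_lt _ hn⟩
    · rintro ⟨hx0, hxn⟩
      obtain ⟨k, hk1, hk2, hkx⟩ := pvCover n g hn hcop x hx0 hxn
      rw [hfirst, ← hkx]
      by_cases hk : k = 1
      · subst hk
        exact pvALoop_mono n g _ _ _ _ ((PySem.Set.mem_add _ _ _).mpr (Or.inr rfl))
      · exact pvALoop_reach n g hn hcop n.toNat 1 _ (le_refl 1)
          (by omega) k (by omega) hk2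
  · simp only [hcop, decide_false]
    rw [Bool.eq_false_iff]
    intro heq
    have h1mem : (1 : Int) ∈ pvALoop n g (n.toNat + 1) (-1) PySem.Set.empty := by
      rw [(PySem.Set.equal_iff _ _).mp heq 1, hmemgrp]
      omega
    have hdvd : (Int.gcd g n : Int) ∣ 1 :=
      pvALoop_dvd n g (Int.gcd g n) (Int.gcd_dvd_left g n) (Int.gcd_dvd_right g n)
        (n.toNat + 1) (-1) PySem.Set.empty (Or.inl rfl) (by intro x hx; cases hx) 1 h1mem
    have : Int.gcd g n ∣ 1 := by exact_mod_cast hdvd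
    exact hcop (Nat.dvd_one.mp this)

-- B's per-candidate test equals the coprimality test, for 2 ≤ g < n
theorem pvBCond (n g : Int) (hg2 : 2 ≤ g) (hgn : g < n) :
    (pvBGcd (n.toNat + 2) g n == 1) = decide (Int.gcd g n = 1) := by
  have hn : 0 < n := by omega
  rw [pvBGcd_eq (n.toNat + 2) g n (by omega) (by omega) (by omega)]
  by_cases h : Int.gcd g n = 1
  · simp [h]
  · simp only [h, decide_false, beq_eq_false_iff_ne, ne_eq]
    intro hc
    exact h (by exact_mod_cast hc)

-- ===== VERDICT (by name: the statement is the Claim_ definition above) =====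
theorem generators_without_gcd_spec : Claim_equal_generators_without_gcd := by
  intro n _
  unfold Spec_generators_without_gcd generators_without_gcd generators_without_gcd_alt
  simp only []
  rw [PySem.List.foldl_append_if
    (fun g => PySem.Set.equal (pvALoop n g (n.toNat + 1) (-1) PySem.Set.empty)
      (PySem.Set.ofList (PySem.List.pyRange 0 n 1))) (fun g => g)]
  rw [List.map_id']
  show 1 :: _ = 1 :: _
  congr 1
  apply List.filter_congr
  intro g hg
  rw [PySem.List.mem_pyRange_one] at hg
  rw [pvACond n g hg.1 hg.2, pvBCond n g hg.1 hg.2]
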